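-- pv_equiv track=rewrite | github.com/cry999/AtCoder | beginner/022/B.py | bumble_bee
-- ===== SOURCE A (Python) =====
-- def bumble_bee(N: int, A: list) -> int:
--     count = 0
--     exist = set()
--
--     for a in A:
--         if a in exist:
--             count += 1
--         else:
--             exist.add(a)
--     return count
-- ===== SOURCE B (Python) =====
-- def bumble_bee(N: int, A: list) -> int:
--     return len(A) - len(set(A))
-- ===== Notes on version B (the rewrite author's own statement) =====
-- stated objective: simpler
-- what changed: Replaces the incremental seen-set loop with the one-line closed form len(A) - len(set(A)): duplicates counted = total elements minus distinct elements.
import Mathlib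
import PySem

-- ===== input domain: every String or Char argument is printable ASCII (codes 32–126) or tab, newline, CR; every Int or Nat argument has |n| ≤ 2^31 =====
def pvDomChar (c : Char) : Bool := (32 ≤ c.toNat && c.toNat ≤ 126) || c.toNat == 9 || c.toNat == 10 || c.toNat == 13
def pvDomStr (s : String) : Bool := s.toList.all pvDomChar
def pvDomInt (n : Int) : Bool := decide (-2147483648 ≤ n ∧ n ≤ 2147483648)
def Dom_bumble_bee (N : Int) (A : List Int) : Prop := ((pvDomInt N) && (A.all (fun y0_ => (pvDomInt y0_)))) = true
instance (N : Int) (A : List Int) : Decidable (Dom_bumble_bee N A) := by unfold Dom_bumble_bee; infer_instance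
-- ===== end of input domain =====

-- B replaces A's seen-set counting loop with the closed form len(A) - len(set(A)).
-- ===== PORT A =====
def bumble_bee (N : Int) (A : List Int) : Int :=
  (A.foldl (fun (p : Int × PySem.Set Int) a =>
      if PySem.Set.contains p.2 a then (p.1 + 1, p.2) else (p.1, PySem.Set.add p.2 a))
    (0, PySem.Set.empty)).1

-- ===== PORT B =====
def bumble_bee_alt (N : Int) (A : List Int) : Int :=
  (A.length : Int) - ((PySem.Set.ofList A).length : Int)

-- ===== PRECONDITION & SPEC =====
def Spec_bumble_bee (N : Int) (A : List Int) (out : Int) : Prop := out = bumble_bee_alt N A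
instance (N : Int) (A : List Int) (out : Int) : Decidable (Spec_bumble_bee N A out) := by unfold Spec_bumble_bee; infer_instance

-- ===== CLAIM (what is proved, stated in full; the proofs are below) =====
def Claim_equal_bumble_bee : Prop := ∀ (N : Int) (A : List Int), Dom_bumble_bee N A → Spec_bumble_bee N A (bumble_bee N A)

-- ===== LEMMAS AND PROOFS =====
theorem bumble_bee_loop_inv (A : List Int) : ∀ (c : Int) (s : PySem.Set Int),
    (A.foldl (fun (p : Int × PySem.Set Int) a =>
        if PySem.Set.contains p.2 a then (p.1 + 1, p.2) else (p.1, PySem.Set.add p.2 a))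
      (c, s)).1
    = c + (A.length : Int) - (((PySem.Set.update s A).length : Int) - (s.length : Int)) := by
  induction A with
  | nil => intro c s; simp [PySem.Set.update]
  | cons a t ih =>
    intro c s
    rw [List.foldl_cons]
    by_cases h : a ∈ s
    · have hc : PySem.Set.contains s a = true := by simp [PySem.Set.contains, h]
      have hu : PySem.Set.update s (a :: t) = PySem.Set.update s t := by
        simp [PySem.Set.update, List.foldl_cons, PySem.Set.add, h]
      rw [if_pos hc, ih, hu]
      simp only [List.length_cons]
      push_cast; ring
    · have hc : PySem.Set.contains s a = false := by simp [PySem.Set.contains, h]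
      have ha : PySem.Set.add s a = s ++ [a] := by simp [PySem.Set.add, h]
      have hu : PySem.Set.update s (a :: t) = PySem.Set.update (s ++ [a]) t := by
        simp [PySem.Set.update, List.foldl_cons, ha]
      rw [if_neg (by simp [h]), ih, ha, hu]
      simp only [List.length_append, List.length_cons, List.length_nil]
      push_cast; ring

-- ===== VERDICT (by name: the statement is the Claim_ definition above) =====
theorem bumble_bee_spec : Claim_equal_bumble_bee := by
  intro N A _
  unfold Spec_bumble_bee bumble_bee bumble_bee_alt
  rw [bumble_bee_loop_inv]
  have h : PySem.Set.update PySem.Set.empty A = PySem.Set.ofList A := by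
    simp [PySem.Set.update, PySem.Set.ofList_eq_foldl, PySem.Set.empty]
  rw [h]
  simp [PySem.Set.empty]
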